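-- pv_equiv track=rewrite | github.com/paulrobello/parsidion-cc | skills/parsidion-cc/scripts/post_compact_hook.py | extract_latest_snapshot
-- ===== SOURCE A (Python) =====
-- _SNAPSHOT_HEADING = "## Pre-Compact Snapshot"
--
-- def extract_latest_snapshot(daily_content: str) -> str | None:
--     """Extract the most recent Pre-Compact Snapshot section from a daily note.
--
--     Scans backwards through the note to find the last occurrence of
--     ``## Pre-Compact Snapshot``, then collects all lines belonging to that
--     section (until the next ``##``-level heading or end-of-file).
--
--     Args:
--         daily_content: Full text of a daily vault note.
--
--     Returns:
--         The snapshot section text (including heading), or ``None`` if not found.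
--     """
--     lines = daily_content.splitlines()
--
--     # Find the last occurrence of the snapshot heading
--     last_idx: int | None = None
--     for i, line in enumerate(lines):
--         if line.startswith(_SNAPSHOT_HEADING):
--             last_idx = i
--
--     if last_idx is None:
--         return None
--
--     # Collect lines from that heading until the next same-level heading or EOF
--     section_lines: list[str] = [lines[last_idx]]
--     for line in lines[last_idx + 1 :]:
--         if line.startswith("## ") and not line.startswith(_SNAPSHOT_HEADING):
--             break
--         section_lines.append(line)
--
--     return "\n".join(section_lines).strip()
-- ===== SOURCE B (Python) =====
-- _SNAPSHOT_HEADING = "## Pre-Compact Snapshot"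
--
--
-- def extract_latest_snapshot(daily_content):
--     """Group the note's lines into '## '-headed sections in a single pass,
--     then return the last section whose heading is a Pre-Compact Snapshot
--     heading (joined and stripped), or None if there is none."""
--     sections = []
--     for line in daily_content.splitlines():
--         if line.startswith("## "):
--             sections.append([line])
--         elif sections:
--             sections[-1].append(line)
--     snaps = [s for s in sections if s[0].startswith(_SNAPSHOT_HEADING)]
--     if not snaps:
--         return None
--     return "\n".join(snaps[-1]).strip()
-- ===== Notes on version B (the rewrite author's own statement) =====
-- stated objective: alternative
-- what changed: B replaces A's two-step scan (record the index of the last snapshot heading, then re-scan forward from it until the next level-2 heading) by a single grouping pass that partitions the lines into heading-led sections and then selects the last section led by a snapshot heading.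
import Mathlib
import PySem

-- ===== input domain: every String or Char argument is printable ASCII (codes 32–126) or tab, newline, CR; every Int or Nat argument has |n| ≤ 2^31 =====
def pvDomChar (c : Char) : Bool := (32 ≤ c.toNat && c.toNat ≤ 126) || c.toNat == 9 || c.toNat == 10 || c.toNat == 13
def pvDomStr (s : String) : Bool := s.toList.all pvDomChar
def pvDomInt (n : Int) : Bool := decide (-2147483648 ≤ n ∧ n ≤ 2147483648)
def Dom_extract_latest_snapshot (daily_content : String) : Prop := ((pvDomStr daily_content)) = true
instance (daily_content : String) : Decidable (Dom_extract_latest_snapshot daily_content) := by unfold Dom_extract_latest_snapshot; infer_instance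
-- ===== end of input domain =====

-- B changes the decomposition: instead of A's two-step scan (record the last snapshot-heading index, then
-- re-scan forward from it until the next level-2 heading), B groups the lines into heading-led sections in
-- one pass and selects the last snapshot section (objective: alternative).

-- ===== PORT A =====
def pvH : String := "## Pre-Compact Snapshot"

-- A's second for-loop with its break condition, accumulator = section_lines
def pvCollectA (acc : List String) : List String → List String
  | [] => acc
  | l :: ls =>
    if PySem.Str.startswith l "## " && !(PySem.Str.startswith l pvH) then acc
    else pvCollectA (acc ++ [l]) ls

def extract_latest_snapshot (daily_content : String) : Option String :=
  let lines := PySem.Str.splitlines daily_content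
  let last_idx : Option Int :=
    (PySem.List.enumerate lines 0).foldl
      (fun acc p => if PySem.Str.startswith p.2 pvH then some p.1 else acc) none
  match last_idx with
  | none => none
  | some i =>
    -- lines[last_idx]: the none case is Python's IndexError, unreachable since last_idx is a valid index
    (PySem.List.pyGet? lines i).map (fun hd =>
      PySem.Str.strip (PySem.Str.join "\n"
        (pvCollectA [hd] (PySem.List.slice lines (some (i + 1)) none))))

-- ===== PORT B =====
-- one step of B's grouping loop: a '## ' line starts a new section, other lines join the last section (if any)
def pvStepB (sections : List (List String)) (line : String) : List (List String) :=
  if PySem.Str.startswith line "## " then sections ++ [[line]]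
  else match sections.getLast? with
    | none => sections
    | some g => sections.dropLast ++ [g ++ [line]]

-- Source B's filter predicate s[0].startswith(_SNAPSHOT_HEADING); the [] case is Python's IndexError, unreachable since sections are nonempty
def pvHeadSnap (s : List String) : Bool :=
  match s with
  | [] => false
  | h :: _ => PySem.Str.startswith h pvH

def extract_latest_snapshot_alt (daily_content : String) : Option String :=
  let sections := (PySem.Str.splitlines daily_content).foldl pvStepB []
  let snaps := sections.filter pvHeadSnap
  match snaps.getLast? with
  | none => none
  | some s => some (PySem.Str.strip (PySem.Str.join "\n" s))

-- ===== PRECONDITION & SPEC =====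
def Spec_extract_latest_snapshot (daily_content : String) (out : Option String) : Prop := out = extract_latest_snapshot_alt daily_content
instance (daily_content : String) (out : Option String) : Decidable (Spec_extract_latest_snapshot daily_content out) := by unfold Spec_extract_latest_snapshot; infer_instance

-- ===== CLAIM (what is proved, stated in full; the proofs are below) =====
def Claim_equal_extract_latest_snapshot : Prop := ∀ (daily_content : String), Dom_extract_latest_snapshot daily_content → Spec_extract_latest_snapshot daily_content (extract_latest_snapshot daily_content)

-- ===== LEMMAS AND PROOFS =====

-- core of A on a line list
def pvLastIdx (ls : List String) : Option Int :=
  (PySem.List.enumerate ls 0).foldl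
    (fun acc p => if PySem.Str.startswith p.2 pvH then some p.1 else acc) none

def pvAcore (ls : List String) : Option (List String) :=
  match pvLastIdx ls with
  | none => none
  | some i => (PySem.List.pyGet? ls i).map (fun hd =>
      pvCollectA [hd] (PySem.List.slice ls (some (i + 1)) none))

-- core of B on a line list
def pvBcore (ls : List String) : Option (List String) :=
  ((ls.foldl pvStepB []).filter pvHeadSnap).getLast?

-- "no break" predicate of A's collecting loop
def pvNb (l : String) : Bool := !(PySem.Str.startswith l "## " && !(PySem.Str.startswith l pvH))

theorem pvSW_trans (l : String) (h : PySem.Str.startswith l pvH = true) :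
    PySem.Str.startswith l "## " = true := by
  simp only [PySem.Str.startswith_eq, PySem.Chars.startswith_iff] at h ⊢
  exact List.IsPrefix.trans (by decide) h

theorem pvCollectA_eq (xs : List String) : ∀ acc, pvCollectA acc xs = acc ++ xs.takeWhile pvNb := by
  induction xs with
  | nil => intro acc; simp [pvCollectA]
  | cons l ls ih =>
    intro acc
    have hnb : pvNb l = !(PySem.Str.startswith l "## " && !(PySem.Str.startswith l pvH)) := rfl
    cases h : (PySem.Str.startswith l "## " && !(PySem.Str.startswith l pvH)) with
    | true =>
      rw [h] at hnb
      rw [show pvCollectA acc (l :: ls)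
            = if (PySem.Str.startswith l "## " && !(PySem.Str.startswith l pvH)) then acc
              else pvCollectA (acc ++ [l]) ls from rfl, if_pos h, List.takeWhile_cons, hnb]
      simp
    | false =>
      rw [h] at hnb
      rw [show pvCollectA acc (l :: ls)
            = if (PySem.Str.startswith l "## " && !(PySem.Str.startswith l pvH)) then acc
              else pvCollectA (acc ++ [l]) ls from rfl, if_neg (by rw [h]; exact Bool.false_ne_true), List.takeWhile_cons, hnb]
      simp [ih]

theorem pvTakeWhile_snoc_neg {p : String → Bool} {l : String} (hl : p l = false) (xs : List String) :
    (xs ++ [l]).takeWhile p = xs.takeWhile p := by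
  induction xs with
  | nil => simp [hl]
  | cons x xs ih =>
    by_cases hx : p x = true
    · simp [hx, ih]
    · simp [hx]

theorem pvTakeWhile_snoc_pos {p : String → Bool} {l : String} (hl : p l = true) (xs : List String) :
    (xs ++ [l]).takeWhile p = if xs.all p then xs ++ [l] else xs.takeWhile p := by
  induction xs with
  | nil => simp [hl]
  | cons x xs ih =>
    by_cases hx : p x = true
    · simp [hx, ih]
      split_ifs <;> simp
    · simp [hx]

theorem pvLastIdx_snoc (ls : List String) (l : String) :
    pvLastIdx (ls ++ [l]) =
      if PySem.Str.startswith l pvH then some (ls.length : Int) else pvLastIdx ls := by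
  unfold pvLastIdx
  rw [PySem.List.enumerate_append, List.foldl_append]
  simp [PySem.List.enumerate_cons, PySem.List.enumerate_nil]

theorem pvLastIdx_bound (ls : List String) :
    ∀ j, pvLastIdx ls = some j → ∃ k : Nat, j = (k : Int) ∧ k < ls.length := by
  induction ls using List.reverseRecOn with
  | nil => intro j h; simp [pvLastIdx, PySem.List.enumerate_nil] at h
  | append_singleton ls l ih =>
    intro j h
    rw [pvLastIdx_snoc] at h
    by_cases hl : PySem.Str.startswith l pvH = true
    · rw [if_pos hl] at h
      exact ⟨ls.length, (Option.some.inj h).symm, by simp⟩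
    · rw [if_neg hl] at h
      obtain ⟨k, hk1, hk2⟩ := ih j h
      exact ⟨k, hk1, by simp; omega⟩

theorem pvAcore_some (ls : List String) (k : Nat) (hk : k < ls.length)
    (hL : pvLastIdx ls = some (k : Int)) :
    pvAcore ls = some (ls[k] :: (ls.drop (k + 1)).takeWhile pvNb) := by
  have h1 : ((k : Int) + 1) = ((k + 1 : Nat) : Int) := by push_cast; ring
  unfold pvAcore
  rw [hL]
  show (PySem.List.pyGet? ls (k : Int)).map
      (fun hd => pvCollectA [hd] (PySem.List.slice ls (some ((k : Int) + 1)) none)) = _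
  rw [h1, PySem.List.slice_from_natCast]
  simp [PySem.List.pyGet?_natCast, List.getElem?_eq_getElem hk, pvCollectA_eq]

-- "A's collector is still open": last heading found and no break since
def pvOpenA (ls : List String) : Prop :=
  ∃ k : Nat, pvLastIdx ls = some (k : Int) ∧ (ls.drop (k + 1)).all pvNb = true

-- "B's current section is a snapshot section"
def pvOpenB (s : List (List String)) : Prop :=
  ∃ g, s.getLast? = some g ∧ pvHeadSnap g = true

-- all-true lists are their own takeWhile
theorem pvTakeWhile_all {p : String → Bool} : ∀ {xs : List String}, xs.all p = true → xs.takeWhile p = xs := by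
  intro xs
  induction xs with
  | nil => intro _; rfl
  | cons x xs ih =>
    intro h
    rw [List.all_cons, Bool.and_eq_true] at h
    rw [List.takeWhile_cons, if_pos h.1, ih h.2]

theorem pvFold_snoc (ls : List String) (l : String) :
    (ls ++ [l]).foldl pvStepB [] = pvStepB (ls.foldl pvStepB []) l := by
  rw [List.foldl_append]; rfl

theorem pvInv (ls : List String) :
    (∀ g ∈ ls.foldl pvStepB [], ∃ h t, g = h :: t ∧ PySem.Str.startswith h "## " = true)
    ∧ pvAcore ls = pvBcore ls
    ∧ (pvOpenB (ls.foldl pvStepB []) ↔ pvOpenA ls) := by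
  induction ls using List.reverseRecOn with
  | nil =>
    refine ⟨by simp, rfl, ?_⟩
    constructor
    · rintro ⟨g, hg, -⟩; simp at hg
    · rintro ⟨k, hk, -⟩
      rw [show pvLastIdx [] = none from rfl] at hk
      simp at hk
  | append_singleton ls l ih =>
    obtain ⟨ih1, ih2, ih3⟩ := ih
    by_cases hH : PySem.Str.startswith l pvH = true
    · -- l is a snapshot heading
      have h2 : PySem.Str.startswith l "## " = true := pvSW_trans l hH
      have hs' : (ls ++ [l]).foldl pvStepB [] = ls.foldl pvStepB [] ++ [[l]] := by
        rw [pvFold_snoc]; unfold pvStepB; rw [if_pos h2]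
      have hLI : pvLastIdx (ls ++ [l]) = some (ls.length : Int) := by
        rw [pvLastIdx_snoc, if_pos hH]
      have hk : ls.length < (ls ++ [l]).length := by simp
      have hA' : pvAcore (ls ++ [l]) = some [l] := by
        rw [pvAcore_some (ls ++ [l]) ls.length hk hLI]
        have hget : (ls ++ [l])[ls.length] = l := by simp
        have hdrop : (ls ++ [l]).drop (ls.length + 1) = [] :=
          List.drop_eq_nil_of_le (by simp)
        rw [hget, hdrop]
        rfl
      have hsnap : pvHeadSnap [l] = true := hH
      have hfil : List.filter pvHeadSnap [[l]] = [[l]] := by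
        rw [List.filter_cons, if_pos hsnap]; rfl
      refine ⟨?_, ?_, ?_⟩
      · intro g hg
        rw [hs'] at hg
        rcases List.mem_append.1 hg with h | h
        · exact ih1 g h
        · simp only [List.mem_singleton] at h
          exact ⟨l, [], h, h2⟩
      · rw [hA', pvBcore, hs', List.filter_append, hfil, List.getLast?_concat]
      · constructor
        · intro _
          refine ⟨ls.length, hLI, ?_⟩
          rw [List.drop_eq_nil_of_le (le_of_eq (by simp))]
          rfl
        · intro _
          exact ⟨[l], by rw [hs', List.getLast?_concat], hsnap⟩
    · have hH' : PySem.Str.startswith l pvH = false := Bool.eq_false_iff.2 hH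
      by_cases hhh : PySem.Str.startswith l "## " = true
      · -- l is a non-snapshot heading
        have hs' : (ls ++ [l]).foldl pvStepB [] = ls.foldl pvStepB [] ++ [[l]] := by
          rw [pvFold_snoc]; unfold pvStepB; rw [if_pos hhh]
        have hLI : pvLastIdx (ls ++ [l]) = pvLastIdx ls := by
          rw [pvLastIdx_snoc, if_neg hH]
        have hsnap : pvHeadSnap [l] = false := hH'
        have hnb : pvNb l = false := by
          unfold pvNb; rw [hhh, hH']; rfl
        have hfil : List.filter pvHeadSnap [[l]] = [] := by
          rw [List.filter_cons, if_neg (by rw [hsnap]; exact Bool.false_ne_true)]; rfl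
        have hB' : pvBcore (ls ++ [l]) = pvBcore ls := by
          rw [pvBcore, pvBcore, hs', List.filter_append, hfil, List.append_nil]
        have hmem : ∀ g ∈ (ls ++ [l]).foldl pvStepB [],
            ∃ h t, g = h :: t ∧ PySem.Str.startswith h "## " = true := by
          intro g hg
          rw [hs'] at hg
          rcases List.mem_append.1 hg with h | h
          · exact ih1 g h
          · simp only [List.mem_singleton] at h
            exact ⟨l, [], h, hhh⟩
        have hOB : ¬ pvOpenB ((ls ++ [l]).foldl pvStepB []) := by
          rintro ⟨g, hg, hsn⟩
          rw [hs', List.getLast?_concat] at hg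
          rw [← Option.some.inj hg] at hsn
          exact Bool.false_ne_true (hsnap ▸ hsn)
        cases hL : pvLastIdx ls with
        | none =>
          have hA0 : pvAcore ls = none := by unfold pvAcore; rw [hL]
          have hA' : pvAcore (ls ++ [l]) = none := by unfold pvAcore; rw [hLI, hL]
          refine ⟨hmem, by rw [hA', hB', ← ih2, hA0], ?_⟩
          constructor
          · intro h; exact absurd h hOB
          · rintro ⟨k, hk, -⟩
            rw [hLI, hL] at hk
            simp at hk
        | some j =>
          obtain ⟨k, rfl, hklen⟩ := pvLastIdx_bound ls j hL
          have hk' : k < (ls ++ [l]).length := by simp; omega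
          have hL' : pvLastIdx (ls ++ [l]) = some (k : Int) := by rw [hLI, hL]
          have hdrop : (ls ++ [l]).drop (k + 1) = ls.drop (k + 1) ++ [l] :=
            List.drop_append_of_le_length (by omega)
          have hget : (ls ++ [l])[k]'hk' = ls[k]'hklen := List.getElem_append_left hklen
          have hA' : pvAcore (ls ++ [l]) = pvAcore ls := by
            rw [pvAcore_some (ls ++ [l]) k hk' hL', pvAcore_some ls k hklen hL,
              hdrop, pvTakeWhile_snoc_neg hnb, hget]
          refine ⟨hmem, by rw [hA', hB', ih2], ?_⟩
          constructor
          · intro h; exact absurd h hOB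
          · rintro ⟨k2, hk2, hall⟩
            rw [hLI, hL] at hk2
            have : k2 = k := Int.natCast_inj.1 (Option.some.inj hk2).symm
            subst this
            rw [hdrop, List.all_append] at hall
            simp [hnb] at hall
      · -- l is a plain line
        have hnb : pvNb l = true := by
          unfold pvNb
          rw [Bool.eq_false_iff.2 hhh]
          rfl
        have hLI : pvLastIdx (ls ++ [l]) = pvLastIdx ls := by
          rw [pvLastIdx_snoc, if_neg hH]
        have hstep : (ls ++ [l]).foldl pvStepB []
            = match (ls.foldl pvStepB []).getLast? with
              | none => ls.foldl pvStepB []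
              | some g => (ls.foldl pvStepB []).dropLast ++ [g ++ [l]] := by
          rw [pvFold_snoc]; unfold pvStepB; rw [if_neg (by rw [Bool.eq_false_iff.2 hhh]; exact Bool.false_ne_true)]
        cases hlast : (ls.foldl pvStepB []).getLast? with
        | none =>
          have hsnil : ls.foldl pvStepB [] = [] := List.getLast?_eq_none_iff.1 hlast
          have hs' : (ls ++ [l]).foldl pvStepB [] = [] := by
            rw [hstep, hlast, hsnil]
          have hB0 : pvBcore ls = none := by rw [pvBcore, hsnil]; rfl
          have hL0 : pvLastIdx ls = none := by
            cases hL : pvLastIdx ls with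
            | none => rfl
            | some j =>
              obtain ⟨k, rfl, hklen⟩ := pvLastIdx_bound ls j hL
              have := pvAcore_some ls k hklen hL
              rw [ih2, hB0] at this
              simp at this
          have hA' : pvAcore (ls ++ [l]) = none := by unfold pvAcore; rw [hLI, hL0]
          have hB' : pvBcore (ls ++ [l]) = none := by rw [pvBcore, hs']; rfl
          refine ⟨by rw [hs']; intro g hg; exact absurd hg (List.not_mem_nil), by rw [hA', hB'], ?_⟩
          constructor
          · rintro ⟨g, hg, -⟩
            rw [hs'] at hg
            simp at hg
          · rintro ⟨k, hk, -⟩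
            rw [hLI, hL0] at hk
            simp at hk
        | some g =>
          obtain ⟨ys, hys⟩ := List.getLast?_eq_some_iff.1 hlast
          obtain ⟨h, t, hg, hsh⟩ := ih1 g (by rw [hys]; exact List.mem_append.2 (Or.inr (List.mem_singleton.2 rfl)))
          have hs' : (ls ++ [l]).foldl pvStepB [] = ys ++ [g ++ [l]] := by
            rw [hstep, hlast, hys, List.dropLast_concat]
          have hhead : pvHeadSnap (g ++ [l]) = pvHeadSnap g := by
            rw [hg]; rfl
          have hmem : ∀ g' ∈ (ls ++ [l]).foldl pvStepB [],
              ∃ h' t', g' = h' :: t' ∧ PySem.Str.startswith h' "## " = true := by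
            intro g' hg'
            rw [hs'] at hg'
            rcases List.mem_append.1 hg' with hm | hm
            · exact ih1 g' (by rw [hys]; exact List.mem_append.2 (Or.inl hm))
            · simp only [List.mem_singleton] at hm
              exact ⟨h, t ++ [l], by rw [hm, hg]; rfl, hsh⟩
          cases hp : pvHeadSnap g with
          | false =>
            have hfilg : List.filter pvHeadSnap [g] = [] := by
              rw [List.filter_cons, if_neg (by rw [hp]; exact Bool.false_ne_true)]; rfl
            have hfilgl : List.filter pvHeadSnap [g ++ [l]] = [] := by
              rw [List.filter_cons, if_neg (by rw [hhead, hp]; exact Bool.false_ne_true)]; rfl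
            have hB' : pvBcore (ls ++ [l]) = pvBcore ls := by
              rw [pvBcore, pvBcore, hs', hys, List.filter_append, List.filter_append, hfilg, hfilgl]
            have hOBold : ¬ pvOpenB (ls.foldl pvStepB []) := by
              rintro ⟨g', hg', hsn⟩
              rw [hlast] at hg'
              rw [← Option.some.inj hg'] at hsn
              exact Bool.false_ne_true (hp ▸ hsn)
            have hOB : ¬ pvOpenB ((ls ++ [l]).foldl pvStepB []) := by
              rintro ⟨g', hg', hsn⟩
              rw [hs', List.getLast?_concat] at hg'
              rw [← Option.some.inj hg'] at hsn
              rw [hhead, hp] at hsn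
              exact Bool.false_ne_true hsn
            have hnopenA : ¬ pvOpenA ls := fun hoa => hOBold (ih3.2 hoa)
            cases hL : pvLastIdx ls with
            | none =>
              have hA0 : pvAcore ls = none := by unfold pvAcore; rw [hL]
              have hA' : pvAcore (ls ++ [l]) = none := by unfold pvAcore; rw [hLI, hL]
              refine ⟨hmem, by rw [hA', hB', ← ih2, hA0], ?_⟩
              constructor
              · intro hx; exact absurd hx hOB
              · rintro ⟨k, hk, -⟩
                rw [hLI, hL] at hk
                simp at hk
            | some j =>
              obtain ⟨k, rfl, hklen⟩ := pvLastIdx_bound ls j hL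
              have hall : (ls.drop (k + 1)).all pvNb = false := by
                cases hb : (ls.drop (k + 1)).all pvNb with
                | false => rfl
                | true => exact absurd ⟨k, hL, hb⟩ hnopenA
              have hk' : k < (ls ++ [l]).length := by simp; omega
              have hL' : pvLastIdx (ls ++ [l]) = some (k : Int) := by rw [hLI, hL]
              have hdrop : (ls ++ [l]).drop (k + 1) = ls.drop (k + 1) ++ [l] :=
                List.drop_append_of_le_length (by omega)
              have hget : (ls ++ [l])[k]'hk' = ls[k]'hklen := List.getElem_append_left hklen
              have hA' : pvAcore (ls ++ [l]) = pvAcore ls := by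
                rw [pvAcore_some (ls ++ [l]) k hk' hL', pvAcore_some ls k hklen hL,
                  hdrop, pvTakeWhile_snoc_pos hnb, hall, hget]
                rfl
              refine ⟨hmem, by rw [hA', hB', ih2], ?_⟩
              constructor
              · intro hx; exact absurd hx hOB
              · rintro ⟨k2, hk2, hall2⟩
                rw [hLI, hL] at hk2
                have : k2 = k := Int.natCast_inj.1 (Option.some.inj hk2).symm
                subst this
                rw [hdrop, List.all_append] at hall2
                rw [Bool.and_eq_true] at hall2
                rw [hall2.1] at hall
                exact Bool.noConfusion hall
          | true =>
            have hfilg : List.filter pvHeadSnap [g] = [g] := by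
              rw [List.filter_cons, if_pos hp]; rfl
            have hfilgl : List.filter pvHeadSnap [g ++ [l]] = [g ++ [l]] := by
              rw [List.filter_cons, if_pos (by rw [hhead]; exact hp)]; rfl
            have hB0 : pvBcore ls = some g := by
              rw [pvBcore, hys, List.filter_append, hfilg, List.getLast?_concat]
            have hB' : pvBcore (ls ++ [l]) = some (g ++ [l]) := by
              rw [pvBcore, hs', List.filter_append, hfilgl, List.getLast?_concat]
            have hopenA : pvOpenA ls := ih3.1 ⟨g, hlast, hp⟩
            obtain ⟨k, hL, hall⟩ := hopenA
            have hklen : k < ls.length := by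
              obtain ⟨k2, hk2, hklen2⟩ := pvLastIdx_bound ls (k : Int) hL
              rwa [Int.natCast_inj.1 hk2]
            have hA0 : pvAcore ls = some (ls[k]'hklen :: ls.drop (k + 1)) := by
              rw [pvAcore_some ls k hklen hL, pvTakeWhile_all hall]
            have hgeq : g = ls[k]'hklen :: ls.drop (k + 1) := by
              have := ih2
              rw [hA0, hB0] at this
              exact (Option.some.inj this).symm
            have hk' : k < (ls ++ [l]).length := by simp; omega
            have hL' : pvLastIdx (ls ++ [l]) = some (k : Int) := by rw [hLI, hL]
            have hdrop : (ls ++ [l]).drop (k + 1) = ls.drop (k + 1) ++ [l] :=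
              List.drop_append_of_le_length (by omega)
            have hget : (ls ++ [l])[k]'hk' = ls[k]'hklen := List.getElem_append_left hklen
            have hA' : pvAcore (ls ++ [l]) = some (g ++ [l]) := by
              rw [pvAcore_some (ls ++ [l]) k hk' hL', hdrop, pvTakeWhile_snoc_pos hnb, hall, hget, hgeq]
              rfl
            refine ⟨hmem, by rw [hA', hB'], ?_⟩
            constructor
            · intro _
              refine ⟨k, hL', ?_⟩
              rw [hdrop, List.all_append, hall]
              simp [hnb]
            · intro _
              exact ⟨g ++ [l], by rw [hs', List.getLast?_concat], by rw [hhead]; exact hp⟩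

theorem pvCore_eq (ls : List String) : pvAcore ls = pvBcore ls := (pvInv ls).2.1

-- ===== VERDICT (by name: the statement is the Claim_ definition above) =====
theorem extract_latest_snapshot_spec : Claim_equal_extract_latest_snapshot := by
  intro d _
  show extract_latest_snapshot d = extract_latest_snapshot_alt d
  have hA : extract_latest_snapshot d
      = (pvAcore (PySem.Str.splitlines d)).map (fun s => PySem.Str.strip (PySem.Str.join "\n" s)) := by
    unfold extract_latest_snapshot pvAcore pvLastIdx
    dsimp only
    cases h : (PySem.List.enumerate (PySem.Str.splitlines d) 0).foldl
      (fun acc p => if PySem.Str.startswith p.2 pvH then some p.1 else acc) none with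
    | none => rfl
    | some i =>
      dsimp only
      rw [Option.map_map]
      rfl
  have hB : extract_latest_snapshot_alt d
      = (pvBcore (PySem.Str.splitlines d)).map (fun s => PySem.Str.strip (PySem.Str.join "\n" s)) := by
    unfold extract_latest_snapshot_alt pvBcore
    dsimp only
    cases h : (((PySem.Str.splitlines d).foldl pvStepB []).filter pvHeadSnap).getLast? with
    | none => rfl
    | some s => rfl
  rw [hA, hB, pvCore_eq]
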